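-- pv_equiv track=rewrite | github.com/Bertinus/FLeCS | flecs/sc/utils.py | subsample_to_length
-- ===== SOURCE A (Python) =====
-- def subsample_to_length(path_list, target_length):
--     assert len(path_list) >= target_length
--
--     _step = (len(path_list)-1) // (target_length-1)
--     rest = (len(path_list)-1) % (target_length-1)
--
--     idx = 0
--     subsampled_path_list = [path_list[idx]]
--     for i in range(target_length - 1 - rest):
--         idx += _step
--         subsampled_path_list.append(path_list[idx])
--     for i in range(rest):
--         idx += _step + 1
--         subsampled_path_list.append(path_list[idx])
--
--     return subsampled_path_list
-- ===== SOURCE B (Python) =====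
-- def subsample_to_length(path_list, target_length):
--     assert len(path_list) >= target_length
--     _step, rest = divmod(len(path_list) - 1, target_length - 1)
--     cut = target_length - 1 - rest
--     return [path_list[0]] + [path_list[i * _step + max(0, i - cut)]
--                              for i in range(1, target_length)]
-- ===== Notes on version B (the rewrite author's own statement) =====
-- stated objective: simpler
-- what changed: Keeps the first element explicitly and replaces the stateful index accumulator threaded through A's two sequential loops by a single comprehension computing each output index in closed form (i*step plus the overflow correction max(0, i-cut)).
import Mathlib
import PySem

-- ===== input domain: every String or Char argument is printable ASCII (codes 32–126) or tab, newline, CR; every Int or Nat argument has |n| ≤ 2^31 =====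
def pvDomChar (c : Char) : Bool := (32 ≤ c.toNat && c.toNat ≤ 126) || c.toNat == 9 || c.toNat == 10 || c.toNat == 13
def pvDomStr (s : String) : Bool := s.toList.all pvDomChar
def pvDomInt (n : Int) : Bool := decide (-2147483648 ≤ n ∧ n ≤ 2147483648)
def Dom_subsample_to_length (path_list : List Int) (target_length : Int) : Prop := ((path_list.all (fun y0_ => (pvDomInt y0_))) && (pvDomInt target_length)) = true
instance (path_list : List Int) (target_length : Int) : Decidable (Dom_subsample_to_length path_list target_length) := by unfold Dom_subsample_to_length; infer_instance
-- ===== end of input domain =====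

-- B replaces A's stateful index accumulator (two sequential loops) by one comprehension with a
-- closed-form per-element index; objective: simpler.

-- ===== PORT A =====
def subsample_to_length (path_list : List Int) (target_length : Int) : List Int :=
  let step := PySem.Int.floordiv ((path_list.length : Int) - 1) (target_length - 1)
  let rest := PySem.Int.mod ((path_list.length : Int) - 1) (target_length - 1)
  let s1 := (PySem.List.pyRange 0 (target_length - 1 - rest) 1).foldl
      (fun (st : Int × List Int) _ =>
        (st.1 + step, st.2 ++ [PySem.List.pyGetD path_list (st.1 + step) 0]))
      (0, [PySem.List.pyGetD path_list 0 0])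
  let s2 := (PySem.List.pyRange 0 rest 1).foldl
      (fun (st : Int × List Int) _ =>
        (st.1 + step + 1, st.2 ++ [PySem.List.pyGetD path_list (st.1 + step + 1) 0]))
      s1
  s2.2

-- ===== PORT B =====
def subsample_to_length_alt (path_list : List Int) (target_length : Int) : List Int :=
  let step := PySem.Int.floordiv ((path_list.length : Int) - 1) (target_length - 1)
  let rest := PySem.Int.mod ((path_list.length : Int) - 1) (target_length - 1)
  let cut := target_length - 1 - rest
  [PySem.List.pyGetD path_list 0 0] ++
    (PySem.List.pyRange 1 target_length 1).map
      (fun i => PySem.List.pyGetD path_list (i * step + max 0 (i - cut)) 0)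

-- ===== PRECONDITION & SPEC =====
-- Pre_ is exactly where A returns normally: len(path_list) >= target_length (else AssertionError),
-- target_length ≠ 1 (else ZeroDivisionError), and a nonempty list (else IndexError at path_list[0]).
def Pre_subsample_to_length (path_list : List Int) (target_length : Int) : Prop :=
  target_length ≤ (path_list.length : Int) ∧ target_length ≠ 1 ∧ path_list ≠ []
instance (path_list : List Int) (target_length : Int) : Decidable (Pre_subsample_to_length path_list target_length) := by unfold Pre_subsample_to_length; infer_instance
def pvWitness_subsample_to_length : List Int × Int := ([10, 20, 30, 40, 50, 60, 70, 80, 90, 100, 110], 4)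

def Spec_subsample_to_length (path_list : List Int) (target_length : Int) (out : List Int) : Prop := out = subsample_to_length_alt path_list target_length
instance (path_list : List Int) (target_length : Int) (out : List Int) : Decidable (Spec_subsample_to_length path_list target_length out) := by unfold Spec_subsample_to_length; infer_instance

-- ===== CLAIM (what is proved, stated in full; the proofs are below) =====
def Claim_equal_subsample_to_length : Prop := ∀ (path_list : List Int) (target_length : Int), Dom_subsample_to_length path_list target_length → Pre_subsample_to_length path_list target_length → Spec_subsample_to_length path_list target_length (subsample_to_length path_list target_length)

-- ===== LEMMAS AND PROOFS =====

-- A's loops, generically: starting from index idx0 and accumulator acc, each of the l.length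
-- iterations advances the index by d and appends the element at the new index.
theorem pv_fold_step {α : Type} (g : Int → Int) (d : Int) :
    ∀ (l : List α) (idx0 : Int) (acc : List Int),
      l.foldl (fun (st : Int × List Int) _ => (st.1 + d, st.2 ++ [g (st.1 + d)])) (idx0, acc)
        = (idx0 + l.length * d,
           acc ++ (List.range l.length).map (fun (j : Nat) => g (idx0 + ((j : Int) + 1) * d))) := by
  intro l
  induction l with
  | nil => intro idx0 acc; simp
  | cons x xs ih =>
      intro idx0 acc
      simp only [List.foldl_cons, ih (idx0 + d) (acc ++ [g (idx0 + d)]),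
        List.length_cons, List.range_succ_eq_map, List.map_cons, List.map_map,
        Prod.mk.injEq, List.append_assoc, List.singleton_append]
      refine ⟨by push_cast; ring, ?_⟩
      congr 1
      congr 1
      · congr 1; push_cast; ring
      · apply List.map_congr_left
        intro j _
        simp only [Function.comp, Nat.succ_eq_add_one]
        congr 1
        push_cast; ring

theorem subsample_equal (path_list : List Int) (target_length : Int)
    (hpre : Pre_subsample_to_length path_list target_length) :
    subsample_to_length path_list target_length
      = subsample_to_length_alt path_list target_length := by
  obtain ⟨htn, ht1, hne⟩ := hpre
  set n : Int := (path_list.length : Int) with hn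
  have hn1 : 1 ≤ n := by
    have : path_list.length ≠ 0 := fun h => hne (List.eq_nil_of_length_eq_zero h)
    omega
  set step := PySem.Int.floordiv (n - 1) (target_length - 1) with hstep
  set rest := PySem.Int.mod (n - 1) (target_length - 1) with hrest
  set cut := target_length - 1 - rest with hcut
  set g : Int → Int := fun i => PySem.List.pyGetD path_list i 0 with hg
  by_cases ht2 : 2 ≤ target_length
  · -- the intended case: target_length ≥ 2
    have hpos : 0 < target_length - 1 := by omega
    have hr0 : 0 ≤ rest := PySem.Int.mod_nonneg (n - 1) hpos
    have hr1 : rest < target_length - 1 := PySem.Int.mod_lt (n - 1) hpos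
    have hcut1 : 1 ≤ cut := by omega
    set m : Nat := cut.toNat with hm
    set r : Nat := rest.toNat with hrr
    have hmc : (m : Int) = cut := by omega
    have hrc : (r : Int) = rest := by omega
    -- evaluate A
    have hA : subsample_to_length path_list target_length
        = [g 0] ++ (List.range m).map (fun (j : Nat) => g (((j : Int) + 1) * step))
            ++ (List.range r).map (fun (j : Nat) => g ((m : Int) * step + ((j : Int) + 1) * (step + 1))) := by
      show ((PySem.List.pyRange 0 rest 1).foldl
        (fun (st : Int × List Int) _ => (st.1 + step + 1, st.2 ++ [g (st.1 + step + 1)]))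
        ((PySem.List.pyRange 0 (target_length - 1 - rest) 1).foldl
          (fun (st : Int × List Int) _ => (st.1 + step, st.2 ++ [g (st.1 + step)]))
          (0, [g 0]))).2 = _
      have e1 := pv_fold_step g step (PySem.List.pyRange 0 (target_length - 1 - rest) 1) 0 [g 0]
      have hlen1 : (PySem.List.pyRange 0 (target_length - 1 - rest) 1).length = m := by
        rw [PySem.List.length_pyRange_one]; omega
      rw [hlen1] at e1
      have e2step : (fun (st : Int × List Int) _ =>
          (st.1 + step + 1, st.2 ++ [g (st.1 + step + 1)]))
          = (fun (st : Int × List Int) (_ : Int) =>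
          (st.1 + (step + 1), st.2 ++ [g (st.1 + (step + 1))])) := by
        funext st _; simp [add_assoc]
      have hlen2 : (PySem.List.pyRange 0 rest 1).length = r := by
        rw [PySem.List.length_pyRange_one]; omega
      rw [e1, e2step]
      have e2 := pv_fold_step g (step + 1) (PySem.List.pyRange 0 rest 1)
        (0 + (m : Int) * step) ([g 0] ++ (List.range m).map (fun (j : Nat) => g (0 + ((j : Int) + 1) * step)))
      rw [hlen2] at e2
      rw [e2]
      simp only [zero_add, List.append_assoc]
    -- evaluate B
    have hB : subsample_to_length_alt path_list target_length
        = g 0 :: (List.range (m + r)).map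
            (fun (k : Nat) => g ((1 + (k : Int)) * step + max 0 (1 + (k : Int) - cut))) := by
      show [g 0] ++ (PySem.List.pyRange 1 target_length 1).map
          (fun i => g (i * step + max 0 (i - cut))) = _
      rw [PySem.List.pyRange_one, List.map_map]
      have : (target_length - 1).toNat = m + r := by omega
      rw [this]
      simp only [List.singleton_append]
      congr 1
    rw [hA, hB, List.range_add, List.map_append, List.map_map,
      List.append_assoc, List.singleton_append]
    congr 1
    congr 1
    · -- first loop
      apply List.map_congr_left
      intro j hj
      rw [List.mem_range] at hj
      congr 1
      have h0 : max 0 (1 + (j : Int) - cut) = 0 := by omega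
      rw [h0]; ring
    · -- second loop
      apply List.map_congr_left
      intro j hj
      rw [List.mem_range] at hj
      simp only [Function.comp]
      congr 1
      push_cast
      have h0 : max 0 (1 + ((m : Int) + (j : Int)) - cut) = (j : Int) + 1 := by omega
      rw [h0]; ring
  · -- degenerate case: target_length ≤ 0, both sides return just the first element
    have htneg : target_length ≤ 0 := by omega
    have hb : target_length - 1 < 0 := by omega
    have hmb := PySem.Int.mod_neg_bounds (n - 1) hb
    show ((PySem.List.pyRange 0 rest 1).foldl
      (fun (st : Int × List Int) _ => (st.1 + step + 1, st.2 ++ [g (st.1 + step + 1)]))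
      ((PySem.List.pyRange 0 (target_length - 1 - rest) 1).foldl
        (fun (st : Int × List Int) _ => (st.1 + step, st.2 ++ [g (st.1 + step)]))
        (0, [g 0]))).2
      = [g 0] ++ (PySem.List.pyRange 1 target_length 1).map
          (fun i => g (i * step + max 0 (i - cut)))
    rw [PySem.List.pyRange_one_eq_nil (show target_length - 1 - rest ≤ 0 by omega),
      PySem.List.pyRange_one_eq_nil (show rest ≤ 0 by omega),
      PySem.List.pyRange_one_eq_nil (show target_length ≤ 1 by omega)]
    simp

-- ===== VERDICT (by name: the statement is the Claim_ definition above) =====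
theorem subsample_to_length_spec : Claim_equal_subsample_to_length := by
  intro path_list target_length _ hpre
  exact subsample_equal path_list target_length hpre
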